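-- pv_equiv track=rewrite | github.com/prafuel/os_lab | 8.fcfs.py | find_finish_time
-- ===== SOURCE A (Python) =====
-- def find_finish_time(n, at, bt):
--     ft = [0] * n
--     ft[0] = at[0] + bt[0]
--     for i in range(1, n):
--         if at[i] > ft[i - 1]:
--             ft[i] = at[i] + bt[i]
--         else:
--             ft[i] = ft[i - 1] + bt[i]
--     return ft
-- ===== SOURCE B (Python) =====
-- def find_finish_time(n, at, bt):
--     # prefix-sum + running-max over the first n processes:
--     # ft[i] = sum(bt[:i+1]) + max over k <= i of (at[k] - sum(bt[:k]))
--     a = at[:n]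
--     b = bt[:n]
--     pre = b[0]
--     m = a[0]
--     ft = [pre + m]
--     for i in range(1, n):
--         m = max(m, a[i] - pre)
--         pre += b[i]
--         ft.append(pre + m)
--     return ft
-- ===== Notes on version B (the rewrite author's own statement) =====
-- stated objective: alternative
-- what changed: Replaces the if/else threading of the previous finish time through a preallocated list with a branch-free prefix-sum of bt plus a running maximum of (at[k] - prefix_before_k), appending each finish time to a fresh list.
import Mathlib
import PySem

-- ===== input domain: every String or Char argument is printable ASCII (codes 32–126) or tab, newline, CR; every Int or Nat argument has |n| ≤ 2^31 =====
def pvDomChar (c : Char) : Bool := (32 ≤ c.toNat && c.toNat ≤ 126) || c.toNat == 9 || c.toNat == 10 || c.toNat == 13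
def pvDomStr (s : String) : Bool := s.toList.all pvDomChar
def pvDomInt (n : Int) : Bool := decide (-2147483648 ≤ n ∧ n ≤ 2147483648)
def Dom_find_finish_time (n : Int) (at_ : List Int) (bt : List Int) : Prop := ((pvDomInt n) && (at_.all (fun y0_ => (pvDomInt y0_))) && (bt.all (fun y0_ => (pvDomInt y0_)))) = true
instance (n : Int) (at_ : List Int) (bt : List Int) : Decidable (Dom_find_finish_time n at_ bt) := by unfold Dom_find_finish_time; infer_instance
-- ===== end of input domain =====

-- B replaces A's previous-finish-time threading through a preallocated list by a branch-free prefix-sum + running-max scan (alternative decomposition, same cost); proved equal on Pre_.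
-- ===== PORT A =====
def find_finish_time (n : Int) (at_ : List Int) (bt : List Int) : List Int :=
  let ft := PySem.List.pyRepeat [0] n
  let ft := PySem.List.pySetD ft 0 (PySem.List.pyGetD at_ 0 0 + PySem.List.pyGetD bt 0 0)
  (PySem.List.pyRange 1 n 1).foldl (fun ft i =>
    if PySem.List.pyGetD at_ i 0 > PySem.List.pyGetD ft (i - 1) 0 then
      PySem.List.pySetD ft i (PySem.List.pyGetD at_ i 0 + PySem.List.pyGetD bt i 0)
    else
      PySem.List.pySetD ft i (PySem.List.pyGetD ft (i - 1) 0 + PySem.List.pyGetD bt i 0)) ft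

-- ===== PORT B =====
def find_finish_time_alt (n : Int) (at_ : List Int) (bt : List Int) : List Int :=
  let a := PySem.List.slice at_ none (some n)
  let b := PySem.List.slice bt none (some n)
  let pre0 := PySem.List.pyGetD b 0 0
  let m0 := PySem.List.pyGetD a 0 0
  ((PySem.List.pyRange 1 n 1).foldl (fun (s : Int × Int × List Int) i =>
      let m := max s.2.1 (PySem.List.pyGetD a i 0 - s.1)
      let pre := s.1 + PySem.List.pyGetD b i 0
      (pre, m, s.2.2 ++ [pre + m])) (pre0, m0, [pre0 + m0])).2.2

-- ===== PRECONDITION & SPEC =====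
-- Pre_: A assigns ft[0] and reads at[i], bt[i] for i < n, so it returns (no IndexError) iff 1 ≤ n and both lists have at least n elements.
def Pre_find_finish_time (n : Int) (at_ : List Int) (bt : List Int) : Prop :=
  1 ≤ n ∧ n ≤ at_.length ∧ n ≤ bt.length
instance (n : Int) (at_ : List Int) (bt : List Int) : Decidable (Pre_find_finish_time n at_ bt) := by
  unfold Pre_find_finish_time; infer_instance
def pvWitness_find_finish_time : Int × List Int × List Int := (3, [0, 2, 10], [4, 3, 2])

def Spec_find_finish_time (n : Int) (at_ : List Int) (bt : List Int) (out : List Int) : Prop := out = find_finish_time_alt n at_ bt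
instance (n : Int) (at_ : List Int) (bt : List Int) (out : List Int) : Decidable (Spec_find_finish_time n at_ bt out) := by unfold Spec_find_finish_time; infer_instance

-- ===== CLAIM (what is proved, stated in full; the proofs are below) =====
def Claim_equal_find_finish_time : Prop := ∀ (n : Int) (at_ : List Int) (bt : List Int), Dom_find_finish_time n at_ bt → Pre_find_finish_time n at_ bt → Spec_find_finish_time n at_ bt (find_finish_time n at_ bt)

-- ===== LEMMAS AND PROOFS =====

-- the finish time of process k, as A computes it (A's branch kept verbatim)
def ffRef (at_ : List Int) (bt : List Int) : Nat → Int
  | 0 => PySem.List.pyGetD at_ 0 0 + PySem.List.pyGetD bt 0 0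
  | k + 1 =>
    if PySem.List.pyGetD at_ ((k + 1 : Nat) : Int) 0 > ffRef at_ bt k then
      PySem.List.pyGetD at_ ((k + 1 : Nat) : Int) 0 + PySem.List.pyGetD bt ((k + 1 : Nat) : Int) 0
    else
      ffRef at_ bt k + PySem.List.pyGetD bt ((k + 1 : Nat) : Int) 0

-- prefix sums of bt, as B maintains them
def ffPre (bt : List Int) : Nat → Int
  | 0 => 0
  | k + 1 => ffPre bt k + PySem.List.pyGetD bt ((k : Nat) : Int) 0

-- B's running maximum after k iterations
def ffMax (at_ : List Int) (bt : List Int) : Nat → Int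
  | 0 => PySem.List.pyGetD at_ 0 0
  | k + 1 => max (ffMax at_ bt k) (PySem.List.pyGetD at_ ((k : Nat) : Int) 0 - ffPre bt k)

theorem ffRef_eq (at_ bt : List Int) : ∀ k : Nat,
    ffRef at_ bt k = ffPre bt (k + 1) + ffMax at_ bt (k + 1) := by
  intro k
  induction k with
  | zero => simp [ffRef, ffPre, ffMax]; omega
  | succ k ih =>
    simp only [ffRef, ffPre, ffMax] at *
    split_ifs with h <;> omega

theorem alt_fold (at_ bt : List Int) : ∀ j : Nat,
    (PySem.List.pyRange 1 ((j + 1 : Nat) : Int) 1).foldl (fun (s : Int × Int × List Int) i =>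
      let m := max s.2.1 (PySem.List.pyGetD at_ i 0 - s.1)
      let pre := s.1 + PySem.List.pyGetD bt i 0
      (pre, m, s.2.2 ++ [pre + m]))
      (PySem.List.pyGetD bt 0 0, PySem.List.pyGetD at_ 0 0,
        [PySem.List.pyGetD bt 0 0 + PySem.List.pyGetD at_ 0 0])
    = (ffPre bt (j + 1), ffMax at_ bt (j + 1), (List.range (j + 1)).map (ffRef at_ bt)) := by
  intro j
  induction j with
  | zero =>
    rw [show ((0 + 1 : Nat) : Int) = 1 by norm_num,
      PySem.List.pyRange_one_eq_nil (le_refl 1), List.foldl_nil]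
    refine Prod.ext ?_ (Prod.ext ?_ ?_)
    · show PySem.List.pyGetD bt 0 0 = ffPre bt 1
      simp [ffPre]
    · show PySem.List.pyGetD at_ 0 0 = ffMax at_ bt 1
      simp [ffMax, ffPre]
    · show [PySem.List.pyGetD bt 0 0 + PySem.List.pyGetD at_ 0 0] = _
      simp [ffRef]
      ring
  | succ j ih =>
    have hcast : ((j + 1 + 1 : Nat) : Int) = ((j + 1 : Nat) : Int) + 1 := by push_cast; ring
    rw [hcast, PySem.List.pyRange_one_succ_right (by exact_mod_cast Nat.le_add_left 1 j),
      List.foldl_append, ih]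
    simp only [List.foldl_cons, List.foldl_nil]
    refine Prod.ext ?_ (Prod.ext ?_ ?_)
    · simp [ffPre]
    · simp [ffMax]
    · simp only [List.range_succ, List.map_append, List.map_cons, List.map_nil]
      congr 1
      rw [ffRef_eq at_ bt (j + 1)]
      simp [ffPre, ffMax]

theorem a_fold (at_ bt : List Int) (m : Nat) : ∀ j : Nat, j + 1 ≤ m →
    (PySem.List.pyRange 1 ((j + 1 : Nat) : Int) 1).foldl (fun ft i =>
      if PySem.List.pyGetD at_ i 0 > PySem.List.pyGetD ft (i - 1) 0 then
        PySem.List.pySetD ft i (PySem.List.pyGetD at_ i 0 + PySem.List.pyGetD bt i 0)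
      else
        PySem.List.pySetD ft i (PySem.List.pyGetD ft (i - 1) 0 + PySem.List.pyGetD bt i 0))
      (PySem.List.pySetD (PySem.List.pyRepeat [0] (m : Int)) 0
        (PySem.List.pyGetD at_ 0 0 + PySem.List.pyGetD bt 0 0))
    = (List.range (j + 1)).map (ffRef at_ bt) ++ List.replicate (m - (j + 1)) 0 := by
  intro j
  induction j with
  | zero =>
    intro hm
    rw [show ((0 + 1 : Nat) : Int) = 1 by norm_num,
      PySem.List.pyRange_one_eq_nil (le_refl 1), List.foldl_nil,
      PySem.List.pyRepeat_singleton, PySem.List.pySetD_of_nonneg _ _ (le_refl (0 : Int))]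
    have hrep : List.replicate ((m : Int)).toNat (0 : Int)
        = 0 :: List.replicate (m - 1) 0 := by
      have h1 : ((m : Int)).toNat = (m - 1) + 1 := by omega
      rw [h1, List.replicate_succ]
    rw [hrep]
    simp [ffRef]
  | succ j ih =>
    intro hm
    have hcast : ((j + 1 + 1 : Nat) : Int) = ((j + 1 : Nat) : Int) + 1 := by push_cast; ring
    rw [hcast, PySem.List.pyRange_one_succ_right (by exact_mod_cast Nat.le_add_left 1 j),
      List.foldl_append, ih (by omega)]
    set L := (List.range (j + 1)).map (ffRef at_ bt) ++ List.replicate (m - (j + 1)) 0 with hL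
    have hget : PySem.List.pyGetD L (((j + 1 : Nat) : Int) - 1) 0 = ffRef at_ bt j := by
      have hc2 : (((j + 1 : Nat) : Int) - 1) = ((j : Nat) : Int) := by push_cast; ring
      rw [hc2, PySem.List.pyGetD_natCast]
      have hlt : j < ((List.range (j + 1)).map (ffRef at_ bt)).length := by simp
      rw [hL, List.getD_eq_getElem?_getD, List.getElem?_append_left hlt]
      simp
    have hsetv : ∀ v : Int, L.set (j + 1) v
        = (List.range (j + 1)).map (ffRef at_ bt) ++ (v :: List.replicate (m - (j + 2)) 0) := by
      intro v
      rw [hL, List.set_append]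
      have hnlt : ¬ j + 1 < ((List.range (j + 1)).map (ffRef at_ bt)).length := by simp
      rw [if_neg hnlt]
      have hrep : List.replicate (m - (j + 1)) (0 : Int)
          = 0 :: List.replicate (m - (j + 2)) 0 := by
        rw [show m - (j + 1) = (m - (j + 2)) + 1 by omega, List.replicate_succ]
      simp [hrep]
    have hrhs : (List.range (j + 1 + 1)).map (ffRef at_ bt) ++ List.replicate (m - (j + 1 + 1)) 0
        = (List.range (j + 1)).map (ffRef at_ bt)
          ++ (ffRef at_ bt (j + 1) :: List.replicate (m - (j + 2)) 0) := by
      rw [List.range_succ, List.map_append]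
      simp
    rw [hrhs]
    simp only [List.foldl_cons, List.foldl_nil, hget, PySem.List.pySetD_natCast]
    by_cases h : PySem.List.pyGetD at_ ((j + 1 : Nat) : Int) 0 > ffRef at_ bt j
    · rw [if_pos h, hsetv]
      congr 2
      rw [ffRef, if_pos h]
    · rw [if_neg h, hsetv]
      congr 2
      rw [ffRef, if_neg h]

theorem a_main (at_ bt : List Int) (m : Nat) (hm : 1 ≤ m) :
    (PySem.List.pyRange 1 ((m : Nat) : Int) 1).foldl (fun ft i =>
      if PySem.List.pyGetD at_ i 0 > PySem.List.pyGetD ft (i - 1) 0 then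
        PySem.List.pySetD ft i (PySem.List.pyGetD at_ i 0 + PySem.List.pyGetD bt i 0)
      else
        PySem.List.pySetD ft i (PySem.List.pyGetD ft (i - 1) 0 + PySem.List.pyGetD bt i 0))
      (PySem.List.pySetD (PySem.List.pyRepeat [0] (m : Int)) 0
        (PySem.List.pyGetD at_ 0 0 + PySem.List.pyGetD bt 0 0))
    = (List.range m).map (ffRef at_ bt) := by
  have h := a_fold at_ bt m (m - 1) (by omega)
  rw [show (m - 1) + 1 = m from by omega] at h
  rw [h]
  simp

theorem alt_main (at_ bt : List Int) (m : Nat) (hm : 1 ≤ m) :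
    ((PySem.List.pyRange 1 ((m : Nat) : Int) 1).foldl (fun (s : Int × Int × List Int) i =>
      let mx := max s.2.1 (PySem.List.pyGetD at_ i 0 - s.1)
      let pre := s.1 + PySem.List.pyGetD bt i 0
      (pre, mx, s.2.2 ++ [pre + mx]))
      (PySem.List.pyGetD bt 0 0, PySem.List.pyGetD at_ 0 0,
        [PySem.List.pyGetD bt 0 0 + PySem.List.pyGetD at_ 0 0])).2.2
    = (List.range m).map (ffRef at_ bt) := by
  have h := alt_fold at_ bt (m - 1)
  rw [show (m - 1) + 1 = m from by omega] at h
  rw [h]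

theorem getD_take (xs : List Int) (m i : Nat) (h : i < m) (d : Int) :
    (xs.take m).getD i d = xs.getD i d := by
  simp [List.getD_eq_getElem?_getD, List.getElem?_take_of_lt h]

theorem ffRef_take (at_ bt : List Int) (m : Nat) : ∀ k : Nat, k < m →
    ffRef (at_.take m) (bt.take m) k = ffRef at_ bt k := by
  intro k
  induction k with
  | zero =>
    intro hk
    simp only [ffRef, PySem.List.pyGetD_zero]
    rw [getD_take at_ m 0 hk, getD_take bt m 0 hk]
  | succ k ih =>
    intro hk
    simp only [ffRef, PySem.List.pyGetD_natCast]
    rw [getD_take at_ m (k + 1) hk, getD_take bt m (k + 1) hk, ih (by omega)]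

theorem find_finish_time_spec : Claim_equal_find_finish_time := by
  intro n at_ bt _ hpre
  obtain ⟨h1, _, _⟩ := hpre
  have hn : n = ((n.toNat : Nat) : Int) := by omega
  unfold Spec_find_finish_time
  rw [hn]
  simp only [find_finish_time, find_finish_time_alt]
  rw [PySem.List.slice_to_natCast, PySem.List.slice_to_natCast,
    a_main at_ bt n.toNat (by omega),
    alt_main (at_.take n.toNat) (bt.take n.toNat) n.toNat (by omega)]
  exact List.map_congr_left (fun k hk => (ffRef_take at_ bt n.toNat k (List.mem_range.mp hk)).symm)
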